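-- pv_equiv track=rewrite | github.com/KINGAKWO/freeCodeCamp_Daily_Challenge | Day13/day13.py | get_laptop_cost
-- ===== SOURCE A (Python) =====
-- def get_laptop_cost(laptops, budget):
--     prices = sorted(set(laptops), reverse=True)
--
--     if len(prices) >= 2:
--         second_best = prices[1]
--         if second_best <= budget:
--             return second_best
--
--     affordable = [p for p in prices if p <= budget]
--     return max(affordable) if affordable else 0
-- ===== SOURCE B (Python) =====
-- def get_laptop_cost(laptops, budget):
--     # One pass: track max (hi), largest value strictly below max (sec),
--     # and largest value <= budget (best).
--     hi = sec = best = None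
--     for p in laptops:
--         if hi is None:
--             hi = p
--         elif p > hi:
--             sec, hi = hi, p
--         elif p < hi and (sec is None or p > sec):
--             sec = p
--         if p <= budget and (best is None or p > best):
--             best = p
--     if sec is not None and sec <= budget:
--         return sec
--     return best if best is not None else 0
-- ===== Notes on version B (the rewrite author's own statement) =====
-- stated objective: faster
-- what changed: Replaces sort-of-deduplicated-prices plus a filtered max with a single O(1)-space pass tracking the top two distinct prices and the best affordable price.
import Mathlib
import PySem

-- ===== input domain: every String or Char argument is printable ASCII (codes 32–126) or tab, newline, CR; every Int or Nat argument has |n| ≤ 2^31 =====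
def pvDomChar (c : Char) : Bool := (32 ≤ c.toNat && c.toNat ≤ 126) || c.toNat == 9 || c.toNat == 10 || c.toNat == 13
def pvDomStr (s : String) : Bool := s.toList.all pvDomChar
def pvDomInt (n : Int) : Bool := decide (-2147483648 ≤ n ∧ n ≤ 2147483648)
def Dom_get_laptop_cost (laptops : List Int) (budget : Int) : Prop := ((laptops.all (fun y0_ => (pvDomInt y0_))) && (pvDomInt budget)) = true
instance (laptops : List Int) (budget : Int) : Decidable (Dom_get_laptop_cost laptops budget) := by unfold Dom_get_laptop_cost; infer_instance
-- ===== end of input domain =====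

-- B replaces sorting the deduplicated prices by a single pass tracking the top two
-- distinct prices and the best affordable price (objective: faster, O(n) vs O(n log n)).

-- ===== PORT A =====
def get_laptop_cost (laptops : List Int) (budget : Int) : Int :=
  let prices := PySem.List.sorted (PySem.Set.ofList laptops) (fun x => x) true
  -- Python's trailing 'return max(affordable) if affordable else 0'
  let fallback :=
    let affordable := prices.filter (fun p => decide (p ≤ budget))
    if affordable.isEmpty then 0
    else
      match PySem.List.max? affordable (fun x => x) with
      | some m => m
      | none => 0
  if 2 ≤ prices.length then
    match PySem.List.pyGet? prices 1 with
    | some second_best => if second_best ≤ budget then second_best else fallback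
    | none => fallback
  else fallback

-- ===== PORT B =====
-- one loop iteration of Source B: state is (hi, sec, best)
def altStep (budget : Int) (st : Option Int × Option Int × Option Int) (p : Int) :
    Option Int × Option Int × Option Int :=
  let (hi, sec, best) := st
  let (hi, sec) :=
    match hi with
    | none => (some p, sec)
    | some h =>
      if h < p then (some p, some h)
      else if p < h then
        (if (match sec with | none => true | some s => decide (s < p)) then (some h, some p)
         else (some h, sec))
      else (some h, sec)
  let best :=
    if p ≤ budget then
      (if (match best with | none => true | some b => decide (b < p)) then some p else best)
    else best
  (hi, sec, best)

def get_laptop_cost_alt (laptops : List Int) (budget : Int) : Int :=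
  let st := laptops.foldl (altStep budget) (none, none, none)
  match st.2.1 with
  | some s => if s ≤ budget then s else st.2.2.getD 0
  | none => st.2.2.getD 0

-- ===== PRECONDITION & SPEC =====
def Spec_get_laptop_cost (laptops : List Int) (budget : Int) (out : Int) : Prop := out = get_laptop_cost_alt laptops budget
instance (laptops : List Int) (budget : Int) (out : Int) : Decidable (Spec_get_laptop_cost laptops budget out) := by unfold Spec_get_laptop_cost; infer_instance

-- ===== CLAIM (what is proved, stated in full; the proofs are below) =====
def Claim_equal_get_laptop_cost : Prop := ∀ (laptops : List Int) (budget : Int), Dom_get_laptop_cost laptops budget → Spec_get_laptop_cost laptops budget (get_laptop_cost laptops budget)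

-- ===== LEMMAS AND PROOFS =====

-- characterizations of the three tracked values
def pvIsMax (xs : List Int) (h : Int) : Prop := h ∈ xs ∧ ∀ y ∈ xs, y ≤ h
def pvIsSec (xs : List Int) (s : Int) : Prop :=
  s ∈ xs ∧ (∃ h ∈ xs, s < h) ∧ ∀ y ∈ xs, (∃ h ∈ xs, y < h) → y ≤ s
def pvIsBest (budget : Int) (xs : List Int) (b : Int) : Prop :=
  b ∈ xs ∧ b ≤ budget ∧ ∀ y ∈ xs, y ≤ budget → y ≤ b

def pvInv (budget : Int) (xs : List Int) (st : Option Int × Option Int × Option Int) : Prop :=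
  (match st.1 with | none => xs = [] | some h => pvIsMax xs h) ∧
  (match st.2.1 with | none => ∀ a ∈ xs, ∀ b ∈ xs, ¬ a < b | some s => pvIsSec xs s) ∧
  (match st.2.2 with | none => ∀ y ∈ xs, ¬ y ≤ budget | some b => pvIsBest budget xs b)

lemma pv_inv_step (budget : Int) (xs : List Int) (st : Option Int × Option Int × Option Int) (p : Int)
    (h : pvInv budget xs st) : pvInv budget (xs ++ [p]) (altStep budget st p) := by
  obtain ⟨hi, sec, best⟩ := st
  obtain ⟨h1, h2, h3⟩ := h
  simp only [altStep]
  refine ⟨?_, ?_, ?_⟩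
  · -- hi component
    cases hi with
    | none =>
      simp only at h1; subst h1
      simp [pvIsMax]
    | some h0 =>
      simp only [pvIsMax] at h1
      by_cases hc : h0 < p
      · simp only [hc, if_pos]
        exact ⟨List.mem_append.mpr (Or.inr (by simp)),
          fun y hy => by
            rcases List.mem_append.mp hy with hy | hy
            · exact le_of_lt (lt_of_le_of_lt (h1.2 y hy) hc)
            · simp at hy; omega⟩
      · have hmax : pvIsMax (xs ++ [p]) h0 :=
          ⟨List.mem_append.mpr (Or.inl h1.1),
            fun y hy => by
              rcases List.mem_append.mp hy with hy | hy
              · exact h1.2 y hy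
              · simp at hy; omega⟩
        simp only [hc, if_neg, if_false]
        by_cases hph : p < h0
        · simp only [hph, if_pos]
          cases hd : (match sec with | none => true | some s => decide (s < p)) with
          | true => simp only [hd, if_pos]; exact hmax
          | false => simp only [hd, Bool.false_eq_true, if_neg, if_false]; exact hmax
        · simp only [hph, if_neg, if_false]
          exact hmax
  · -- sec component
    cases hi with
    | none =>
      simp only at h1; subst h1
      cases sec with
      | none => simp
      | some s => simp [pvIsSec] at h2
    | some h0 =>
      simp only [pvIsMax] at h1
      by_cases hc : h0 < p
      · simp only [hc, if_pos]
        refine ⟨List.mem_append.mpr (Or.inl h1.1), ⟨p, by simp, hc⟩, ?_⟩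
        rintro y hy ⟨h', hh', hlt⟩
        rcases List.mem_append.mp hy with hy | hy
        · exact h1.2 y hy
        · simp at hy; subst hy
          rcases List.mem_append.mp hh' with hh' | hh'
          · have := h1.2 h' hh'; omega
          · simp at hh'; omega
      · simp only [hc, if_neg, if_false]
        by_cases hph : p < h0
        · simp only [hph, if_pos]
          cases sec with
          | none =>
            simp only [if_pos]
            refine ⟨List.mem_append.mpr (Or.inr (by simp)), ⟨h0, List.mem_append.mpr (Or.inl h1.1), hph⟩, ?_⟩
            rintro y hy ⟨h', hh', hlt⟩
            rcases List.mem_append.mp hy with hy | hy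
            · rcases List.mem_append.mp hh' with hh' | hh'
              · exact absurd hlt (h2 y hy h' hh')
              · simp at hh'; omega
            · simp at hy; omega
          | some s =>
            obtain ⟨hs1, hs2, hs3⟩ := h2
            by_cases hsp : s < p
            · simp only [hsp, decide_true, if_pos]
              refine ⟨List.mem_append.mpr (Or.inr (by simp)), ⟨h0, List.mem_append.mpr (Or.inl h1.1), hph⟩, ?_⟩
              rintro y hy ⟨h', hh', hlt⟩
              rcases List.mem_append.mp hy with hy | hy
              · rcases List.mem_append.mp hh' with hh' | hh'
                · exact le_of_lt (lt_of_le_of_lt (hs3 y hy ⟨h', hh', hlt⟩) hsp)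
                · simp at hh'; omega
              · simp at hy; omega
            · simp only [hsp, decide_false, if_neg, Bool.false_eq_true, not_false_iff, if_false]
              refine ⟨List.mem_append.mpr (Or.inl hs1), ?_, ?_⟩
              · obtain ⟨h', hh', hlt⟩ := hs2
                exact ⟨h', List.mem_append.mpr (Or.inl hh'), hlt⟩
              · rintro y hy ⟨h', hh', hlt⟩
                rcases List.mem_append.mp hy with hy | hy
                · rcases List.mem_append.mp hh' with hh' | hh'
                  · exact hs3 y hy ⟨h', hh', hlt⟩
                  · simp at hh'; omega
                · simp at hy; omega
        · have hpe : p = h0 := by omega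
          simp only [hph, if_neg, if_false]
          cases sec with
          | none =>
            intro a ha b hb
            rcases List.mem_append.mp ha with ha | ha
            · rcases List.mem_append.mp hb with hb | hb
              · exact h2 a ha b hb
              · simp at hb
                have := h2 a ha h0 h1.1
                omega
            · simp at ha; subst ha
              rcases List.mem_append.mp hb with hb | hb
              · have := h1.2 b hb; omega
              · simp at hb; omega
          | some s =>
            obtain ⟨hs1, hs2, hs3⟩ := h2
            refine ⟨List.mem_append.mpr (Or.inl hs1), ?_, ?_⟩
            · obtain ⟨h', hh', hlt⟩ := hs2
              exact ⟨h', List.mem_append.mpr (Or.inl hh'), hlt⟩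
            · rintro y hy ⟨h', hh', hlt⟩
              rcases List.mem_append.mp hy with hy | hy
              · rcases List.mem_append.mp hh' with hh' | hh'
                · exact hs3 y hy ⟨h', hh', hlt⟩
                · simp at hh'
                  exact hs3 y hy ⟨h0, h1.1, by omega⟩
              · simp at hy; subst hy
                rcases List.mem_append.mp hh' with hh' | hh'
                · have := h1.2 h' hh'; omega
                · simp at hh'; omega
  · -- best component
    by_cases hpb : p ≤ budget
    · simp only [hpb, if_pos]
      cases best with
      | none =>
        simp only [if_pos]
        refine ⟨List.mem_append.mpr (Or.inr (by simp)), hpb, ?_⟩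
        intro y hy hyb
        rcases List.mem_append.mp hy with hy | hy
        · exact absurd hyb (h3 y hy)
        · simp at hy; omega
      | some b =>
        obtain ⟨hb1, hb2, hb3⟩ := h3
        by_cases hbp : b < p
        · simp only [hbp, decide_true, if_pos]
          refine ⟨List.mem_append.mpr (Or.inr (by simp)), hpb, ?_⟩
          intro y hy hyb
          rcases List.mem_append.mp hy with hy | hy
          · have := hb3 y hy hyb; omega
          · simp at hy; omega
        · simp only [hbp, decide_false, if_neg, Bool.false_eq_true, not_false_iff, if_false]
          refine ⟨List.mem_append.mpr (Or.inl hb1), hb2, ?_⟩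
          intro y hy hyb
          rcases List.mem_append.mp hy with hy | hy
          · exact hb3 y hy hyb
          · simp at hy; omega
    · simp only [hpb, if_neg, if_false]
      cases best with
      | none =>
        intro y hy
        rcases List.mem_append.mp hy with hy | hy
        · exact h3 y hy
        · simp at hy; omega
      | some b =>
        obtain ⟨hb1, hb2, hb3⟩ := h3
        refine ⟨List.mem_append.mpr (Or.inl hb1), hb2, ?_⟩
        intro y hy hyb
        rcases List.mem_append.mp hy with hy | hy
        · exact hb3 y hy hyb
        · simp at hy; omega

lemma pv_inv_fold (budget : Int) (xs : List Int) :
    pvInv budget xs (xs.foldl (altStep budget) (none, none, none)) := by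
  induction xs using List.reverseRecOn with
  | nil => exact ⟨rfl, by simp, by simp⟩
  | append_singleton xs p ih =>
    rw [List.foldl_append]
    exact pv_inv_step budget xs _ p ih

-- max? with the identity key is characterized by membership and being an upper bound
lemma max?_id_eq_some_iff (l : List Int) (m : Int) :
    PySem.List.max? l (fun x => x) = some m ↔ m ∈ l ∧ ∀ y ∈ l, y ≤ m := by
  constructor
  · intro h
    exact ⟨PySem.List.max?_mem h, fun y hy => PySem.List.max?_isMax h y hy⟩
  · rintro ⟨hm, hub⟩
    cases hmax : PySem.List.max? l (fun x => x) with
    | none =>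
      rw [PySem.List.max?_eq_none_iff] at hmax
      subst hmax; simp at hm
    | some m' =>
      have h1 : m' ∈ l := PySem.List.max?_mem hmax
      have h2 : ∀ y ∈ l, y ≤ m' := fun y hy => PySem.List.max?_isMax hmax y hy
      have : m = m' := le_antisymm (h2 m hm) (hub m' h1)
      rw [this]

lemma pv_main (xs : List Int) (budget : Int) :
    get_laptop_cost xs budget = get_laptop_cost_alt xs budget := by
  -- facts about the sorted deduplicated price list
  have hmem : ∀ y : Int, y ∈ PySem.List.sorted (PySem.Set.ofList xs) (fun x => x) true ↔ y ∈ xs := by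
    intro y
    rw [PySem.List.mem_sorted, PySem.Set.mem_ofList]
  have hperm : (PySem.List.sorted (PySem.Set.ofList xs) (fun x => x) true).Perm (PySem.Set.ofList xs) :=
    PySem.List.sorted_perm _ _ _
  have hnd : (PySem.List.sorted (PySem.Set.ofList xs) (fun x => x) true).Nodup :=
    hperm.nodup_iff.mpr (PySem.Set.nodup_ofList xs)
  have hle : (PySem.List.sorted (PySem.Set.ofList xs) (fun x => x) true).Pairwise (fun a b => b ≤ a) :=
    PySem.List.sorted_pairwise_rev _ _
  have hgt : (PySem.List.sorted (PySem.Set.ofList xs) (fun x => x) true).Pairwise (fun a b => b < a) :=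
    (hle.and hnd).imp (fun h => lt_of_le_of_ne h.1 (Ne.symm h.2))
  -- the fold invariant for B
  have hinv := pv_inv_fold budget xs
  rcases hst : xs.foldl (altStep budget) (none, none, none) with ⟨hi, sec, best⟩
  rw [hst] at hinv
  obtain ⟨hhi, hsec, hbest⟩ := hinv
  simp only [get_laptop_cost, get_laptop_cost_alt, hst]
  rcases hpx : PySem.List.sorted (PySem.Set.ofList xs) (fun x => x) true with _ | ⟨a, _ | ⟨s2, rest⟩⟩
  · -- no prices at all: xs = []
    rw [hpx] at hmem
    have hxs : xs = [] := by
      apply List.eq_nil_iff_forall_not_mem.mpr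
      intro y hy
      exact absurd ((hmem y).mpr hy) (by simp)
    subst hxs
    simp at hst
    obtain ⟨h1, h2, h3⟩ := hst
    subst h1; subst h2; subst h3
    simp
  · -- exactly one distinct price a: every element of xs equals a
    rw [hpx] at hmem
    have hax : a ∈ xs := (hmem a).mp (by simp)
    have hall : ∀ y ∈ xs, y = a := by
      intro y hy
      have := (hmem y).mpr hy
      simpa using this
    have hsec_none : sec = none := by
      cases sec with
      | none => rfl
      | some s =>
        obtain ⟨hs1, ⟨h, hh, hlt⟩, _⟩ := hsec
        have := hall s hs1
        have := hall h hh
        omega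
    subst hsec_none
    by_cases hab : a ≤ budget
    · have hbv : best = some a := by
        cases best with
        | none => exact absurd hab (hbest a hax)
        | some b =>
          obtain ⟨hb1, _, _⟩ := hbest
          rw [hall b hb1]
      subst hbv
      simp [hab, PySem.List.max?]
    · have hbv : best = none := by
        cases best with
        | none => rfl
        | some b =>
          obtain ⟨hb1, hb2, _⟩ := hbest
          have := hall b hb1
          omega
      subst hbv
      simp [hab]
  · -- at least two distinct prices: a is the max, s2 the second-largest
    rw [hpx] at hmem hgt
    rw [List.pairwise_cons] at hgt
    obtain ⟨hlt_a, hgt'⟩ := hgt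
    rw [List.pairwise_cons] at hgt'
    obtain ⟨hlt_s2, _⟩ := hgt'
    have hax : a ∈ xs := (hmem a).mp (by simp)
    have hsx : s2 ∈ xs := (hmem s2).mp (by simp)
    have hs2a : s2 < a := hlt_a s2 (by simp)
    have hsec_is : pvIsSec xs s2 := by
      refine ⟨hsx, ⟨a, hax, hs2a⟩, ?_⟩
      rintro y hy ⟨h, hh, hyh⟩
      have hyp := (hmem y).mpr hy
      have hhp := (hmem h).mpr hh
      simp only [List.mem_cons] at hyp hhp
      rcases hyp with hya | hys | hyr
      · -- y = a has no strictly larger element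
        exfalso
        rcases hhp with hha | hhs | hhr
        · omega
        · omega
        · have := hlt_a h (List.mem_cons_of_mem _ hhr); omega
      · omega
      · have := hlt_s2 y hyr; omega
    have hsecv : sec = some s2 := by
      cases sec with
      | none =>
        exact absurd hs2a (hsec s2 hsx a hax)
      | some s' =>
        obtain ⟨hs1', hs2', hs3'⟩ := hsec
        have h1 := hs3' s2 hsx ⟨a, hax, hs2a⟩
        have h2 := hsec_is.2.2 s' hs1' hs2'
        have : s' = s2 := le_antisymm h2 h1
        rw [this]
    subst hsecv
    have hget : PySem.List.pyGet? (a :: s2 :: rest) 1 = some s2 := by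
      simp
    rw [hget]
    have hlen : 2 ≤ (a :: s2 :: rest).length := by simp
    simp only [hlen, if_pos]
    by_cases hsb : s2 ≤ budget
    · simp [hsb]
    · simp only [hsb, if_neg, if_false]
      cases best with
      | none =>
        have hfil : (a :: s2 :: rest).filter (fun p => decide (p ≤ budget)) = [] := by
          apply List.filter_eq_nil_iff.mpr
          intro y hy
          simp only [decide_eq_true_eq]
          exact hbest y ((hmem y).mp hy)
        simp [hfil]
      | some b =>
        obtain ⟨hb1, hb2, hb3⟩ := hbest
        have hbf : b ∈ (a :: s2 :: rest).filter (fun p => decide (p ≤ budget)) := by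
          rw [List.mem_filter]
          exact ⟨(hmem b).mpr hb1, by simpa using hb2⟩
        have hmax : PySem.List.max? ((a :: s2 :: rest).filter (fun p => decide (p ≤ budget))) (fun x => x) = some b := by
          rw [max?_id_eq_some_iff]
          refine ⟨hbf, ?_⟩
          intro y hy
          rw [List.mem_filter] at hy
          exact hb3 y ((hmem y).mp hy.1) (by simpa using hy.2)
        have hne : ((a :: s2 :: rest).filter (fun p => decide (p ≤ budget))).isEmpty = false := by
          rw [List.isEmpty_eq_false_iff_exists_mem]
          exact ⟨b, hbf⟩
        rw [hne, hmax]
        simp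

-- ===== VERDICT (by name: the statement is the Claim_ definition above) =====
theorem get_laptop_cost_spec : Claim_equal_get_laptop_cost := by
  intro laptops budget _
  unfold Spec_get_laptop_cost
  exact pv_main laptops budget
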